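-- pv_equiv track=rewrite | github.com/er-prateek-tripathi/Problem_Solving | HackerEarth/Day 2/Solution.py | find_max_border
-- ===== SOURCE A (Python) =====
-- def find_max_border(table):
--     n, m = len(table), len(table[0])
--     max_border = 0
--
--     # Check rows and columns for maximum consecutive black cells
--     for row in table:
--         max_border = max(max_border, max_consecutive_black(row))
--     for col in zip(*table):
--         max_border = max(max_border, max_consecutive_black(col))
--
--     return max_border
--
-- def max_consecutive_black(cells):
--     count = 0
--     max_count = 0
--     for cell in cells:
--         if cell == '#':
--             count += 1
--             max_count = max(max_count, count)
--         else:
--             count = 0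
--     return max_count
-- ===== SOURCE B (Python) =====
-- def find_max_border(table):
--     # Binary search on the answer: the max '#'-run is the largest k such that
--     # '#'*k occurs as a substring of some row or some column (zip truncates to
--     # the shortest row, like A's column pass).
--     lines = list(table) + [''.join(col) for col in zip(*table)]
--     lo, hi = 0, max(len(s) for s in lines)
--     while lo < hi:
--         mid = (lo + hi + 1) // 2
--         if any('#' * mid in s for s in lines):
--             lo = mid
--         else:
--             hi = mid - 1
--     return lo
-- ===== Notes on version B (the rewrite author's own statement) =====
-- stated objective: alternative
-- what changed: Replaces A's direct run-length counting over rows and zip-columns by binary search on the answer: the result is the largest k such that '#'*k occurs as a substring of some row or column string, found by bisection with a substring-membership decision procedure.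
import Mathlib
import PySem

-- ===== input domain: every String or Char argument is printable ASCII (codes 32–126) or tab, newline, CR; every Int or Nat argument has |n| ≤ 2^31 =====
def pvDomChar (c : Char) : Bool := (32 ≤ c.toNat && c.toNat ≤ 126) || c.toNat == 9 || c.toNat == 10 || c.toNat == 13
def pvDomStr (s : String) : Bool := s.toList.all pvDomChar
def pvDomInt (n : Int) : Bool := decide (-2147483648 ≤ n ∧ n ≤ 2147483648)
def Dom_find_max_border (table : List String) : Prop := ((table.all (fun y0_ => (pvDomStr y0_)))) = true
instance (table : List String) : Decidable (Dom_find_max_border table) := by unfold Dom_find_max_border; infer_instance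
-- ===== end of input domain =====

-- B replaces A's direct run-length counting by binary search on the answer k,
-- deciding each step by substring membership of '#'*k in the row/column strings.

-- ===== PORT A =====

-- A's helper max_consecutive_black: running-counter fold carrying (count, max_count)
def mcbStep (s : Int × Int) (c : Char) : Int × Int :=
  if c = '#' then (s.1 + 1, max s.2 (s.1 + 1)) else (0, s.2)

def max_consecutive_black (cells : List Char) : Int :=
  (cells.foldl mcbStep (0, 0)).2

def headD' (l : List Char) : Char := l.headD ' '

-- hand port of Python zip(*table): columns up to the shortest row (exact: zip stops at the shortest iterable)
def zipStar (rows : List (List Char)) : List (List Char) :=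
  match rows with
  | [] => []
  | r :: rs =>
    if h : (r :: rs).all (fun l => !l.isEmpty) then
      ((r :: rs).map headD') :: zipStar ((r :: rs).map List.tail)
    else []
termination_by (rows.headD []).length
decreasing_by
  simp only [List.all_cons, Bool.and_eq_true, Bool.not_eq_eq_eq_not, Bool.not_true] at h
  cases r with
  | nil => simp [List.isEmpty] at h
  | cons a t => simp

def find_max_border (table : List String) : Int :=
  let rows := table.map String.toList
  let afterRows := rows.foldl (fun b r => max b (max_consecutive_black r)) 0
  (zipStar rows).foldl (fun b c => max b (max_consecutive_black c)) afterRows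

-- ===== PORT B =====

-- the `while lo < hi` bisection loop of Source B (Python's `'#'*mid in s` is Chars.isIn of a replicate)
def bsearchB (lines : List (List Char)) (lo hi : Int) : Int :=
  -- mid = (lo + hi + 1) // 2, written inline
  if _h : lo < hi then
    if lines.any (fun s =>
        PySem.Chars.isIn (List.replicate (PySem.Int.floordiv (lo + hi + 1) 2).toNat '#') s) then
      bsearchB lines (PySem.Int.floordiv (lo + hi + 1) 2) hi
    else
      bsearchB lines lo (PySem.Int.floordiv (lo + hi + 1) 2 - 1)
  else lo
termination_by (hi - lo).toNat
decreasing_by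
  · have he : PySem.Int.floordiv (lo + hi + 1) 2 = (lo + hi + 1) / 2 :=
      PySem.Int.floordiv_eq_ediv_of_pos (by omega)
    simp only [he]; omega
  · have he : PySem.Int.floordiv (lo + hi + 1) 2 = (lo + hi + 1) / 2 :=
      PySem.Int.floordiv_eq_ediv_of_pos (by omega)
    simp only [he]; omega

def find_max_border_alt (table : List String) : Int :=
  let rows := table.map String.toList
  let lines := rows ++ zipStar rows            -- ''.join over a tuple of chars is the char list itself
  let hi := match PySem.List.max? (lines.map (fun s => (s.length : Int))) (fun x => x) with
            | some v => v
            | none => 0                        -- unreachable under Pre_: max() raises on an empty table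
  bsearchB lines 0 hi

-- ===== PRECONDITION & SPEC =====
-- Pre_ excludes only the empty table, on which A raises IndexError at table[0] (B raises ValueError at max()).
def Pre_find_max_border (table : List String) : Prop := table ≠ []
instance (table : List String) : Decidable (Pre_find_max_border table) := by unfold Pre_find_max_border; infer_instance

def pvWitness_find_max_border : List String := ["#.#", ".##", "###"]

def Spec_find_max_border (table : List String) (out : Int) : Prop := out = find_max_border_alt table
instance (table : List String) (out : Int) : Decidable (Spec_find_max_border table out) := by unfold Spec_find_max_border; infer_instance

-- ===== CLAIM (what is proved, stated in full; the proofs are below) =====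
def Claim_equal_find_max_border : Prop := ∀ (table : List String), Dom_find_max_border table → Pre_find_max_border table → Spec_find_max_border table (find_max_border table)

-- ===== LEMMAS AND PROOFS =====

-- length of the leading '#' run, and the maximal '#' run, defined structurally
def lead : List Char → Nat
  | [] => 0
  | c :: cs => if c = '#' then lead cs + 1 else 0

def maxRun : List Char → Nat
  | [] => 0
  | c :: cs => max (lead (c :: cs)) (maxRun cs)

theorem lead_le_maxRun (cs : List Char) : lead cs ≤ maxRun cs := by
  cases cs with
  | nil => exact le_refl _
  | cons c cs => exact le_max_left _ _

theorem lead_le_length (cs : List Char) : lead cs ≤ cs.length := by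
  induction cs with
  | nil => exact le_refl _
  | cons c cs ih =>
    simp only [lead, List.length_cons]
    split <;> omega

theorem maxRun_le_length (cs : List Char) : maxRun cs ≤ cs.length := by
  induction cs with
  | nil => exact le_refl _
  | cons c cs ih =>
    simp only [maxRun, List.length_cons]
    have h := lead_le_length (c :: cs)
    simp only [List.length_cons] at h
    omega

-- replicate k '#' is a prefix iff k fits in the leading run
theorem replicate_prefix_iff (cs : List Char) : ∀ (k : Nat),
    List.replicate k '#' <+: cs ↔ k ≤ lead cs := by
  induction cs with
  | nil =>
    intro k
    constructor
    · intro h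
      have := h.length_le
      simp at this
      simp [this, lead]
    · intro h
      cases k with
      | zero => exact List.nil_prefix
      | succ k => simp [lead] at h
  | cons c cs ih =>
    intro k
    cases k with
    | zero => simp [List.nil_prefix, lead]
    | succ k =>
      rw [List.replicate_succ, List.cons_prefix_cons]
      by_cases hc : c = '#'
      · subst hc
        simp only [lead, if_true, true_and]
        rw [ih]
        omega
      · simp only [lead, if_neg hc]
        constructor
        · rintro ⟨h1, _⟩; exact absurd h1.symm hc
        · omega

-- replicate k '#' is an infix iff k fits in the maximal run
theorem replicate_infix_iff (cs : List Char) : ∀ (k : Nat),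
    List.replicate k '#' <:+: cs ↔ k ≤ maxRun cs := by
  induction cs with
  | nil =>
    intro k
    constructor
    · intro h
      have := h.length_le
      simp at this
      simp [this, maxRun]
    · intro h
      have : k = 0 := by simpa [maxRun] using h
      simp [this]
  | cons c cs ih =>
    intro k
    rw [List.infix_cons_iff, replicate_prefix_iff, ih]
    simp only [maxRun]
    omega

-- A's running-counter fold computes max b (max (u + lead) maxRun)
theorem foldl_mcb (cs : List Char) : ∀ (u b : Int), 0 ≤ u → u ≤ b →
    (cs.foldl mcbStep (u, b)).2 = max b (max (u + (lead cs : Int)) ((maxRun cs : Int))) := by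
  induction cs with
  | nil =>
    intro u b h0 hub
    simp only [List.foldl_nil, lead, maxRun, Nat.cast_zero]
    omega
  | cons c cs ih =>
    intro u b h0 hub
    simp only [List.foldl_cons]
    by_cases hc : c = '#'
    · subst hc
      simp only [mcbStep, if_true]
      rw [ih (u + 1) (max b (u + 1)) (by omega) (by omega)]
      simp only [lead, maxRun, if_true]
      push_cast
      omega
    · simp only [mcbStep, if_neg hc]
      rw [ih 0 b (le_refl 0) (by omega)]
      simp only [lead, maxRun, if_neg hc]
      have := lead_le_maxRun cs
      push_cast
      omega

theorem mcb_eq_maxRun (cs : List Char) : max_consecutive_black cs = (maxRun cs : Int) := by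
  unfold max_consecutive_black
  rw [foldl_mcb cs 0 0 (le_refl 0) (le_refl 0)]
  have := lead_le_maxRun cs
  omega

-- characterisation of the running max fold
theorem foldl_max_ge_iff (ls : List (List Char)) : ∀ (a x : Int),
    (x ≤ ls.foldl (fun b l => max b (max_consecutive_black l)) a ↔
      x ≤ a ∨ ∃ l ∈ ls, x ≤ max_consecutive_black l) := by
  induction ls with
  | nil => intro a x; simp
  | cons l ls ih =>
    intro a x
    simp only [List.foldl_cons]
    rw [ih]
    constructor
    · rintro (h | ⟨l', hl', h⟩)
      · rcases le_max_iff.mp h with h | h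
        · exact Or.inl h
        · exact Or.inr ⟨l, List.mem_cons_self, h⟩
      · exact Or.inr ⟨l', List.mem_cons_of_mem _ hl', h⟩
    · rintro (h | ⟨l', hl', h⟩)
      · exact Or.inl (le_trans h (le_max_left _ _))
      · rcases List.mem_cons.mp hl' with h' | h'
        · subst h'; exact Or.inl (le_trans h (le_max_right _ _))
        · exact Or.inr ⟨l', h', h⟩

-- the bisection condition decides `mid ≤ M` for mid ≥ 1
theorem any_iff_le_M (lines : List (List Char)) (mid : Int) (h1 : 1 ≤ mid) :
    ((lines.any (fun s => PySem.Chars.isIn (List.replicate mid.toNat '#') s)) = true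
      ↔ mid ≤ lines.foldl (fun b l => max b (max_consecutive_black l)) 0) := by
  rw [List.any_eq_true, foldl_max_ge_iff]
  constructor
  · rintro ⟨l, hl, hin⟩
    refine Or.inr ⟨l, hl, ?_⟩
    rw [mcb_eq_maxRun]
    have := (replicate_infix_iff l mid.toNat).mp ((PySem.Chars.isIn_iff_infix _ _).mp hin)
    omega
  · rintro (h | ⟨l, hl, h⟩)
    · omega
    · refine ⟨l, hl, ?_⟩
      rw [PySem.Chars.isIn_iff_infix, replicate_infix_iff]
      rw [mcb_eq_maxRun] at h
      omega

-- bisection correctness: with lo ≤ M ≤ hi and 0 ≤ lo the loop returns M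
theorem bsearchB_eq (lines : List (List Char)) :
    ∀ (n : Nat) (lo hi : Int), (hi - lo).toNat = n → 0 ≤ lo →
      lo ≤ lines.foldl (fun b l => max b (max_consecutive_black l)) 0 →
      lines.foldl (fun b l => max b (max_consecutive_black l)) 0 ≤ hi →
      bsearchB lines lo hi = lines.foldl (fun b l => max b (max_consecutive_black l)) 0 := by
  intro n
  induction n using Nat.strong_induction_on with
  | _ n ih =>
    intro lo hi hn h0 hlo hhi
    rw [bsearchB]
    split
    · next hlt =>
      have he : PySem.Int.floordiv (lo + hi + 1) 2 = (lo + hi + 1) / 2 :=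
        PySem.Int.floordiv_eq_ediv_of_pos (by omega)
      have h1 : 1 ≤ PySem.Int.floordiv (lo + hi + 1) 2 := by omega
      split
      · next hcond =>
        have hle := (any_iff_le_M lines (PySem.Int.floordiv (lo + hi + 1) 2) h1).mp hcond
        exact ih (hi - PySem.Int.floordiv (lo + hi + 1) 2).toNat (by omega)
          (PySem.Int.floordiv (lo + hi + 1) 2) hi rfl (by omega) hle hhi
      · next hcond =>
        have hgt : ¬ PySem.Int.floordiv (lo + hi + 1) 2 ≤
            lines.foldl (fun b l => max b (max_consecutive_black l)) 0 := by
          intro hcon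
          exact hcond ((any_iff_le_M lines (PySem.Int.floordiv (lo + hi + 1) 2) h1).mpr hcon)
        exact ih (PySem.Int.floordiv (lo + hi + 1) 2 - 1 - lo).toNat (by omega)
          lo (PySem.Int.floordiv (lo + hi + 1) 2 - 1) rfl h0 hlo (by omega)
    · next hlt => omega

-- ===== VERDICT (by name: the statement is the Claim_ definition above) =====
theorem find_max_border_spec : Claim_equal_find_max_border := by
  intro table _ hpre
  unfold Spec_find_max_border
  cases table with
  | nil => exact absurd rfl hpre
  | cons t ts =>
    unfold find_max_border find_max_border_alt
    simp only [List.map_cons]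
    set rows := t.toList :: ts.map String.toList with hrows
    set lines := rows ++ zipStar rows with hlines
    set M := lines.foldl (fun b l => max b (max_consecutive_black l)) 0 with hM
    -- A's two folds are one fold over lines
    have hA : (zipStar rows).foldl (fun b c => max b (max_consecutive_black c))
        (rows.foldl (fun b r => max b (max_consecutive_black r)) 0) = M := by
      rw [hM, hlines, List.foldl_append]
    rw [hA]
    -- hi is the max of the line lengths; it bounds M
    have hne : lines ≠ [] := by rw [hlines, hrows]; simp
    obtain ⟨v, hv⟩ : ∃ v, PySem.List.max? (lines.map (fun s => (s.length : Int))) (fun x => x) = some v := by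
      cases hveq : PySem.List.max? (lines.map (fun s => (s.length : Int))) (fun x => x) with
      | none =>
        exfalso
        have := (PySem.List.max?_eq_none_iff (xs := lines.map (fun s => (s.length : Int))) (key := fun x => x)).mp hveq
        simp at this
        exact hne this
      | some v => exact ⟨v, rfl⟩
    have hvmem := PySem.List.max?_mem hv
    have hvmax := PySem.List.max?_isMax hv
    have hv0 : 0 ≤ v := by
      obtain ⟨l, _, hl⟩ := List.mem_map.mp hvmem
      omega
    have hM0 : 0 ≤ M := by rw [hM, foldl_max_ge_iff]; exact Or.inl (le_refl 0)
    have hMv : M ≤ v := by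
      have := (foldl_max_ge_iff lines 0 M).mp (le_refl M)
      rcases this with h | ⟨l, hl, h⟩
      · omega
      · have hlen : ((l.length : Int)) ≤ v := by
          exact hvmax _ (List.mem_map.mpr ⟨l, hl, rfl⟩)
        have := maxRun_le_length l
        rw [mcb_eq_maxRun] at h
        omega
    simp only [hv]
    exact (bsearchB_eq lines (v - 0).toNat 0 v rfl (le_refl 0) hM0 hMv).symm
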